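-- pv_equiv track=rewrite | github.com/Sanish32/Data-Structures-and-Algorithms-Programming | Viikko 4/fliptwo.py | solve
-- ===== SOURCE A (Python) =====
-- from collections import deque
--
-- def solve(n,k):
--     q=deque()
--     for i in range(n):
--         q.append(i+1)
--
--     for i in range(k):
--         a=q.popleft()
--         b=q.popleft()
--         q.append(b)
--         q.append(a)
--     return q[0]
-- ===== SOURCE B (Python) =====
-- def solve(n, k):
--     # Closed form: the front after k pair-swap steps is position 2k of the
--     # virtual stream 1..n followed by the swapped re-appends; index reduction
--     # collapses to a single modulus.
--     kk = k if k > 0 else 0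
--     if n % 2 == 1:
--         p = (2 * kk) % (n + 1)
--     else:
--         p = (2 * kk) % (2 * n)
--         if p >= n:
--             p = p - n + 1
--     return p + 1
-- ===== Notes on version B (the rewrite author's own statement) =====
-- stated objective: faster
-- what changed: Replaces the deque simulation (build 1..n, then k pop-pop-append-append steps) with a closed-form index reduction over the virtual append stream, collapsing to a single modulus computation.
-- outside the precondition, e.g. on solve(0, 0): A raises IndexError, B raises ZeroDivisionError; on solve(1, 2): A raises IndexError, B returns 1
import Mathlib
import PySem

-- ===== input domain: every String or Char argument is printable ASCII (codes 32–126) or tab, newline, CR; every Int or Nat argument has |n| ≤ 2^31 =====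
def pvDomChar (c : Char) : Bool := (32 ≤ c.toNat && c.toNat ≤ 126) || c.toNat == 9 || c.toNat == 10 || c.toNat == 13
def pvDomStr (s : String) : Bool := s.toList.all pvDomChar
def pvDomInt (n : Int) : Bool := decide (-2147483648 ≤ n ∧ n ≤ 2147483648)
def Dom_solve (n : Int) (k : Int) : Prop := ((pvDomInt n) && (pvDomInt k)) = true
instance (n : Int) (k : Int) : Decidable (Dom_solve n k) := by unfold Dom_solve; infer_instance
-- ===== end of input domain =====

-- B replaces A's O(n+k) deque simulation by a closed-form index reduction (faster).

-- ===== PORT A =====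
-- collections.deque ported as a front/back pair (the standard functional deque); dqList is the deque's
-- element sequence, used for q[0]
def dqAppend (d : List Int × List Int) (x : Int) : List Int × List Int := (d.1, x :: d.2)

def dqPopleft? (d : List Int × List Int) : Option (Int × (List Int × List Int)) :=
  match d.1 with
  | x :: f => some (x, (f, d.2))
  | [] =>
    match d.2.reverse with
    | x :: f => some (x, (f, []))
    | [] => none

-- one loop body: a=popleft; b=popleft; append b; append a (popleft misses only outside Pre_)
def dqStep (d : List Int × List Int) : List Int × List Int :=
  match dqPopleft? d with
  | some (a, d1) =>
    match dqPopleft? d1 with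
    | some (b, d2) => dqAppend (dqAppend d2 b) a
    | none => d1
  | none => d

def dqList (d : List Int × List Int) : List Int := d.1 ++ d.2.reverse

def solve (n : Int) (k : Int) : Int :=
  let q0 := (PySem.List.pyRange 0 n 1).foldl (fun q i => dqAppend q (i + 1)) ([], [])
  let q1 := (PySem.List.pyRange 0 k 1).foldl (fun q _ => dqStep q) q0
  PySem.List.pyGetD (dqList q1) 0 0

-- ===== PORT B =====
def solve_alt (n : Int) (k : Int) : Int :=
  let kk := if k > 0 then k else 0
  if PySem.Int.mod n 2 = 1 then
    PySem.Int.mod (2 * kk) (n + 1) + 1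
  else
    let p := PySem.Int.mod (2 * kk) (2 * n)
    (if p ≥ n then p - n + 1 else p) + 1

-- ===== PRECONDITION & SPEC =====
-- A raises IndexError exactly when n ≤ 0 (q[0] / popleft on an empty deque) or n = 1 ∧ k > 0 (second popleft).
def Pre_solve (n : Int) (k : Int) : Prop := 2 ≤ n ∨ (n = 1 ∧ k ≤ 0)
instance (n : Int) (k : Int) : Decidable (Pre_solve n k) := by unfold Pre_solve; infer_instance
def pvWitness_solve : Int × Int := (5, 3)

def Spec_solve (n : Int) (k : Int) (out : Int) : Prop := out = solve_alt n k
instance (n : Int) (k : Int) (out : Int) : Decidable (Spec_solve n k out) := by unfold Spec_solve; infer_instance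

-- ===== CLAIM (what is proved, stated in full; the proofs are below) =====
def Claim_equal_solve : Prop := ∀ (n : Int) (k : Int), Dom_solve n k → Pre_solve n k → Spec_solve n k (solve n k)

-- ===== LEMMAS AND PROOFS =====

-- the virtual stream: s m = m+1 for m < n, and s (n+j) = s (j ± 1) (the swapped re-append); fuel-based
def sF (n : Nat) (fuel : Nat) (m : Nat) : Int :=
  match fuel with
  | 0 => 0
  | f+1 => if m < n then (m : Int) + 1
           else sF n f (if (m - n) % 2 = 0 then m - n + 1 else m - n - 1)

theorem sF_succ (n f m : Nat) : sF n (f+1) m =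
    if m < n then (m : Int) + 1
    else sF n f (if (m - n) % 2 = 0 then m - n + 1 else m - n - 1) := rfl

def sN (n m : Nat) : Int := sF n (m + 1) m

-- the queue after j steps is the window [s (2j), …, s (2j+n-1)] of the stream
def Qmap (n j : Nat) : List Int := (List.range n).map (fun i => sN n (2 * j + i))

-- the loop body as a pure list transformation
def qstep (q : List Int) : List Int :=
  match q with
  | a :: b :: rest => rest ++ [b, a]
  | q => q

theorem qstep_cons (a b : Int) (rest : List Int) : qstep (a :: b :: rest) = rest ++ [b, a] := rfl

theorem dqList_append (f b : List Int) (x : Int) :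
    dqList (dqAppend (f, b) x) = dqList (f, b) ++ [x] := by
  simp [dqList, dqAppend]

theorem dqList_foldl_append (l : List Int) (d : List Int × List Int) :
    dqList (l.foldl (fun q i => dqAppend q (i + 1)) d) = dqList d ++ l.map (fun i => i + 1) := by
  induction l generalizing d with
  | nil => simp
  | cons x xs ih =>
    obtain ⟨f, b⟩ := d
    simp only [List.foldl_cons, List.map_cons]
    rw [ih, dqList_append]
    simp [List.append_assoc]

theorem dqStep_sim (d : List Int × List Int) (h : 2 ≤ (dqList d).length) :
    dqList (dqStep d) = qstep (dqList d) := by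
  obtain ⟨f, b⟩ := d
  cases f with
  | nil =>
    cases hrb : b.reverse with
    | nil => simp [dqList, hrb] at h
    | cons y t =>
      cases t with
      | nil => simp [dqList, hrb] at h
      | cons z t' =>
        simp [dqStep, dqPopleft?, dqAppend, dqList, qstep_cons, hrb]
  | cons x f' =>
    cases f' with
    | nil =>
      cases hrb : b.reverse with
      | nil => simp [dqList, hrb] at h
      | cons y t =>
        simp [dqStep, dqPopleft?, dqAppend, dqList, qstep_cons, hrb]
    | cons y f'' =>
      simp [dqStep, dqPopleft?, dqAppend, dqList, qstep_cons, List.append_assoc]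

theorem Qmap_length (n j : Nat) : (Qmap n j).length = n := by
  simp [Qmap]

theorem sF_stable (n : Nat) (hn : 2 ≤ n) :
    ∀ fuel m, m < fuel → sF n fuel m = sN n m := by
  intro fuel
  induction fuel using Nat.strong_induction_on with
  | _ fuel ih =>
    intro m hm
    obtain ⟨f, rfl⟩ : ∃ f, fuel = f + 1 := ⟨fuel - 1, by omega⟩
    by_cases hsm : m < n
    · rw [sF_succ, if_pos hsm, sN, sF_succ, if_pos hsm]
    · rw [sF_succ, if_neg hsm, sN, sF_succ, if_neg hsm]
      rw [ih f (by omega) (if (m - n) % 2 = 0 then m - n + 1 else m - n - 1)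
            (by split <;> omega),
          ih m (by omega) (if (m - n) % 2 = 0 then m - n + 1 else m - n - 1)
            (by split <;> omega)]

theorem s_small (n m : Nat) (h : m < n) : sN n m = (m : Int) + 1 := by
  rw [sN, sF_succ, if_pos h]

theorem s_step (n m : Nat) (hn : 2 ≤ n) (hm : n ≤ m) :
    sN n m = sN n (if (m - n) % 2 = 0 then m - n + 1 else m - n - 1) := by
  have hsm : ¬ m < n := Nat.not_lt.mpr hm
  conv_lhs => rw [sN, sF_succ, if_neg hsm]
  exact sF_stable n hn m _ (by split <;> omega)

theorem s_odd (n : Nat) (hn : 2 ≤ n) (hodd : n % 2 = 1) :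
    ∀ k : Nat, sN n (2 * k) = ((2 * k) % (n + 1) : Nat) + 1 := by
  intro k
  induction k using Nat.strong_induction_on with
  | _ k ih =>
    by_cases h : 2 * k < n
    · rw [s_small n _ h, Nat.mod_eq_of_lt (by omega)]
    · rw [s_step n (2 * k) hn (by omega), if_neg (by omega),
          show 2 * k - n - 1 = 2 * (k - (n + 1) / 2) from by omega,
          ih (k - (n + 1) / 2) (by omega),
          Nat.mod_eq_sub_mod (show 2 * k ≥ n + 1 from by omega),
          show 2 * k - (n + 1) = 2 * (k - (n + 1) / 2) from by omega]

theorem s_even (n : Nat) (hn : 2 ≤ n) (heven : n % 2 = 0) :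
    ∀ k : Nat, sN n (2 * k) =
      (if n ≤ (2 * k) % (2 * n) then (((2 * k) % (2 * n) - n : Nat) : Int) + 1
       else (((2 * k) % (2 * n) : Nat) : Int)) + 1 := by
  intro k
  induction k using Nat.strong_induction_on with
  | _ k ih =>
    by_cases h1 : 2 * k < n
    · rw [s_small n _ h1, Nat.mod_eq_of_lt (by omega), if_neg (by omega)]
    · by_cases h2 : 2 * k < 2 * n
      · rw [s_step n (2 * k) hn (by omega), if_pos (by omega),
            s_small n (2 * k - n + 1) (by omega),
            Nat.mod_eq_of_lt h2, if_pos (by omega)]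
        omega
      · rw [s_step n (2 * k) hn (by omega), if_pos (by omega),
            s_step n (2 * k - n + 1) hn (by omega), if_neg (by omega),
            show 2 * k - n + 1 - n - 1 = 2 * (k - n) from by omega,
            ih (k - n) (by omega),
            Nat.mod_eq_sub_mod (show 2 * k ≥ 2 * n from by omega),
            show 2 * k - 2 * n = 2 * (k - n) from by omega]

theorem s_wrap1 (n' j : Nat) : sN (n'+1+1) (2*(j+1) + n') = sN (n'+1+1) (2*j + 1) := by
  have h := s_step (n'+1+1) (2*(j+1) + n') (by omega) (by omega)
  rw [if_pos (by omega)] at h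
  rw [h]
  congr 1
  omega

theorem s_wrap2 (n' j : Nat) : sN (n'+1+1) (2*(j+1) + (n'+1)) = sN (n'+1+1) (2*j) := by
  have h := s_step (n'+1+1) (2*(j+1) + (n'+1)) (by omega) (by omega)
  rw [if_neg (by omega)] at h
  rw [h]
  congr 1
  omega

theorem qstep_Q (n : Nat) (hn : 2 ≤ n) (j : Nat) : qstep (Qmap n j) = Qmap n (j + 1) := by
  obtain ⟨n', rfl⟩ : ∃ n', n = n' + 1 + 1 := ⟨n - 2, by omega⟩
  have hL : Qmap (n'+1+1) j =
      sN (n'+1+1) (2*j) :: sN (n'+1+1) (2*j+1)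
        :: (List.range n').map (fun i => sN (n'+1+1) (2*(j+1) + i)) := by
    unfold Qmap
    rw [List.range_succ_eq_map, List.map_cons, List.map_map,
        List.range_succ_eq_map, List.map_cons, List.map_map]
    refine congrArg₂ List.cons (by simp) (congrArg₂ List.cons (by simp) ?_)
    apply List.map_congr_left
    intro i _
    simp only [Function.comp_apply, Nat.succ_eq_add_one]
    congr 1
    omega
  have hR : Qmap (n'+1+1) (j+1) =
      (List.range n').map (fun i => sN (n'+1+1) (2*(j+1) + i))
        ++ [sN (n'+1+1) (2*(j+1) + n'), sN (n'+1+1) (2*(j+1) + (n'+1))] := by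
    unfold Qmap
    rw [List.range_succ, List.range_succ, List.map_append, List.map_append, List.append_assoc]
    simp
  rw [hL, qstep_cons, hR, s_wrap1, s_wrap2]

theorem init_Q (n : Nat) :
    dqList ((PySem.List.pyRange 0 (n : Int) 1).foldl (fun q i => dqAppend q (i + 1)) ([], []))
      = Qmap n 0 := by
  rw [dqList_foldl_append, PySem.List.pyRange_zero_natCast, List.map_map]
  show [] ++ _ = _
  rw [List.nil_append]
  unfold Qmap
  apply List.map_congr_left
  intro i hi
  simp only [Function.comp_apply]
  rw [show 2 * 0 + i = i from by omega, s_small n i (List.mem_range.mp hi)]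

theorem loop_Q (n : Nat) (hn : 2 ≤ n) (K : Nat) (d : List Int × List Int)
    (hd : dqList d = Qmap n 0) :
    dqList ((PySem.List.pyRange 0 (K : Int) 1).foldl (fun q _ => dqStep q) d) = Qmap n K := by
  induction K with
  | zero =>
    rw [Nat.cast_zero, PySem.List.pyRange_one_eq_nil le_rfl, List.foldl_nil, hd]
  | succ K ih =>
    rw [show (((K + 1 : Nat)) : Int) = ((K : Int) + 1) from by push_cast; ring,
        PySem.List.pyRange_one_succ_right (by exact_mod_cast Nat.zero_le K),
        List.foldl_append]
    simp only [List.foldl_cons, List.foldl_nil]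
    rw [dqStep_sim _ (by rw [ih, Qmap_length]; omega), ih, qstep_Q n hn K]

theorem head_Q (n : Nat) (hn : 1 ≤ n) (j : Nat) :
    PySem.List.pyGetD (Qmap n j) 0 0 = sN n (2 * j) := by
  obtain ⟨n'', rfl⟩ : ∃ m, n = m + 1 := ⟨n - 1, by omega⟩
  unfold Qmap
  rw [List.range_succ_eq_map, List.map_cons, PySem.List.pyGetD_zero_cons]
  simp

-- ===== VERDICT (by name: the statement is the Claim_ definition above) =====
theorem solve_spec : Claim_equal_solve := by
  intro n k _ hpre
  unfold Spec_solve
  rcases hpre with hn2 | ⟨hn1, hk0⟩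
  · obtain ⟨N, rfl⟩ : ∃ N : Nat, n = (N : Int) := ⟨n.toNat, by omega⟩
    have hN : 2 ≤ N := by exact_mod_cast hn2
    obtain ⟨K, hkk, hrange⟩ : ∃ K : Nat, (if k > 0 then k else 0) = (K : Int) ∧
        PySem.List.pyRange 0 k 1 = PySem.List.pyRange 0 (K : Int) 1 := by
      by_cases h : k > 0
      · exact ⟨k.toNat, by rw [if_pos h]; omega,
          by rw [show ((k.toNat : Int)) = k from by omega]⟩
      · exact ⟨0, by rw [if_neg h, Nat.cast_zero], by
          rw [PySem.List.pyRange_one_eq_nil (by omega), Nat.cast_zero,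
              PySem.List.pyRange_one_eq_nil (by omega)]⟩
    have hA : solve (N : Int) k = sN N (2 * K) := by
      simp only [solve]
      rw [hrange, loop_Q N hN K _ (init_Q N), head_Q N (by omega) K]
    rw [hA]
    simp only [solve_alt]
    rw [hkk]
    have hmod2 : PySem.Int.mod (N : Int) 2 = (N : Int) % 2 :=
      PySem.Int.mod_eq_emod_of_pos (by omega)
    by_cases hpar : N % 2 = 1
    · rw [if_pos (by rw [hmod2]; omega)]
      rw [show ((2 : Int) * (K : Int)) = ((2 * K : Nat) : Int) from by push_cast; ring,
          show ((N : Int) + 1) = ((N + 1 : Nat) : Int) from by push_cast; ring,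
          PySem.Int.mod_natCast, s_odd N hN hpar K]
    · have hpar0 : N % 2 = 0 := by omega
      rw [if_neg (by rw [hmod2]; omega)]
      rw [show ((2 : Int) * (K : Int)) = ((2 * K : Nat) : Int) from by push_cast; ring,
          show ((2 : Int) * (N : Int)) = ((2 * N : Nat) : Int) from by push_cast; ring,
          PySem.Int.mod_natCast, s_even N hN hpar0 K]
      by_cases hc : N ≤ (2 * K) % (2 * N)
      · rw [if_pos hc, if_pos (by exact_mod_cast hc)]
        omega
      · rw [if_neg hc, if_neg (by exact_mod_cast hc)]
  · subst hn1
    have hA : solve 1 k = 1 := by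
      simp only [solve]
      rw [PySem.List.pyRange_one_eq_nil hk0]
      decide
    have hB : solve_alt 1 k = 1 := by
      simp only [solve_alt]
      rw [if_neg (show ¬ k > 0 from by omega)]
      decide
    rw [hA, hB]
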